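-- pv_equiv track=rewrite | github.com/shivamsdhanadhya/UsedCarShopDBApplication | Phase_3/burdellramblinwrecks/services/part_order.py | get_vehicle_part_to_desc_map
-- ===== SOURCE A (Python) =====
-- def get_vehicle_part_freq_dict(prev_orders):
--     vehicle_list = [i[0] for i in prev_orders]
--     vehicle_set= set(vehicle_list)
--     vehicle_part_ordered_freq = {}
--     for vehicle in vehicle_set:
--         vehicle_part_ordered_freq.update({vehicle:vehicle_list.count(vehicle)})
--     return vehicle_part_ordered_freq
--
-- def get_desc_for_vehicle_part(prev_orders, vehicle, part_no):
--     vehicle_specific_part_desc = [entry[-1] for entry in prev_orders if entry[0]==vehicle]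
--     return vehicle_specific_part_desc[part_no-1]
--
-- def get_vehicle_part_to_desc_map(prev_orders):
--     vehicle_part_dict = get_vehicle_part_freq_dict(prev_orders)
--     parent_dict = {}
--     for vehicle in vehicle_part_dict.keys():
--         freq = vehicle_part_dict[vehicle]
--         for part_no in range(1, freq + 1):
--             desc = get_desc_for_vehicle_part(prev_orders, vehicle, part_no)
--             parent_dict.update({vehicle + "-" + "{:02d}".format(part_no): desc})
--     return parent_dict
-- ===== SOURCE B (Python) =====
-- def get_vehicle_part_to_desc_map(prev_orders):
--     groups = {}
--     for entry in prev_orders: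
--         groups.setdefault(entry[0], []).append(entry[-1])
--     result = {}
--     for vehicle, descs in groups.items():
--         for i, desc in enumerate(descs, 1):
--             result[vehicle + "-" + "{:02d}".format(i)] = desc
--     return result
-- ===== Notes on version B (the rewrite author's own statement) =====
-- stated objective: faster
-- what changed: replaces A's count-table plus per-(vehicle,part_no) rescans of prev_orders with one grouping pass (vehicle -> list of descriptions) followed by a direct enumerate over each group
import Mathlib
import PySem

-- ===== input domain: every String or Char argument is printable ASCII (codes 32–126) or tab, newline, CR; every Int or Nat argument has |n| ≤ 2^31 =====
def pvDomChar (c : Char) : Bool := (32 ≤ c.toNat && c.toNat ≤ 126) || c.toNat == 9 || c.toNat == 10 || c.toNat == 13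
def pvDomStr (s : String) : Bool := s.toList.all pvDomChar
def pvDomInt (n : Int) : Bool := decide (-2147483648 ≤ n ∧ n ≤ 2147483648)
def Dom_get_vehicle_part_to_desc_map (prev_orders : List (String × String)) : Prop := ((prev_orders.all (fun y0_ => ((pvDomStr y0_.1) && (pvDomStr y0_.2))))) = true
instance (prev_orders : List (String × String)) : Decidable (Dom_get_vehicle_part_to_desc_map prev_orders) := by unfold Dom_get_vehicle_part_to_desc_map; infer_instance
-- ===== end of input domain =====

-- B replaces A's per-(vehicle, part_no) rescans of prev_orders with a single grouping
-- pass followed by an enumerate over each group (objective: faster, one pass instead of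
-- nested rescans).  Both ports return the dict as its items list; the two Pythons build
-- dicts over the same distinct keys, compared by Python's order-insensitive dict ==.

-- ===== PORT A =====
-- '{:02d}'.format(n)  (n ≥ 1 in every use here) = str(n).zfill(2); shared key-formatting helper
def pvFmt2 (n : Int) : String := PySem.Str.zfill (PySem.Int.toStr n) 2

def get_vehicle_part_freq_dict (prev_orders : List (String × String)) : PySem.Dict String Int :=
  let vehicle_list := prev_orders.map (fun i => i.1)
  let vehicle_set := PySem.Set.ofList vehicle_list
  vehicle_set.foldl
    (fun d vehicle => d.insert vehicle ((PySem.List.count vehicle_list vehicle : Nat) : Int))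
    PySem.Dict.empty

def get_desc_for_vehicle_part (prev_orders : List (String × String)) (vehicle : String) (part_no : Int) : String :=
  let vehicle_specific_part_desc := (prev_orders.filter (fun entry => entry.1 == vehicle)).map (fun entry => entry.2)
  -- list index: IndexError impossible in A's only use (1 ≤ part_no ≤ count); ".getD \"\"" is dead
  (PySem.List.pyGet? vehicle_specific_part_desc (part_no - 1)).getD ""

def get_vehicle_part_to_desc_map (prev_orders : List (String × String)) : List (String × String) :=
  let vehicle_part_dict := get_vehicle_part_freq_dict prev_orders
  let parent_dict := vehicle_part_dict.keys.foldl
    (fun p vehicle =>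
      let freq := vehicle_part_dict.getD vehicle 0   -- key always present; KeyError impossible
      (PySem.List.pyRange 1 (freq + 1)).foldl
        (fun p part_no =>
          p.insert (vehicle ++ "-" ++ pvFmt2 part_no) (get_desc_for_vehicle_part prev_orders vehicle part_no))
        p)
    PySem.Dict.empty
  parent_dict.items

-- ===== PORT B =====
def get_vehicle_part_to_desc_map_alt (prev_orders : List (String × String)) : List (String × String) :=
  let groups := prev_orders.foldl
    (fun d entry => d.modify entry.1 [] (fun l => l ++ [entry.2]))   -- groups.setdefault(entry[0], []).append(entry[-1])
    PySem.Dict.empty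
  let result := groups.items.foldl
    (fun r p =>
      (PySem.List.enumerate p.2 1).foldl
        (fun r q => r.insert (p.1 ++ "-" ++ pvFmt2 q.1) q.2)
        r)
    PySem.Dict.empty
  result.items

-- ===== PRECONDITION & SPEC =====
def Spec_get_vehicle_part_to_desc_map (prev_orders : List (String × String)) (out : List (String × String)) : Prop := out = get_vehicle_part_to_desc_map_alt prev_orders
instance (prev_orders : List (String × String)) (out : List (String × String)) : Decidable (Spec_get_vehicle_part_to_desc_map prev_orders out) := by unfold Spec_get_vehicle_part_to_desc_map; infer_instance

-- ===== CLAIM (what is proved, stated in full; the proofs are below) =====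
def Claim_equal_get_vehicle_part_to_desc_map : Prop := ∀ (prev_orders : List (String × String)), Dom_get_vehicle_part_to_desc_map prev_orders → Spec_get_vehicle_part_to_desc_map prev_orders (get_vehicle_part_to_desc_map prev_orders)

-- ===== LEMMAS AND PROOFS =====

-- the per-vehicle description list both programs index into
def pvDescs (prev_orders : List (String × String)) (v : String) : List String :=
  (prev_orders.filter (fun entry => entry.1 == v)).map (fun entry => entry.2)

-- A's inner loop over range(1, len+1) with positional indexing = B's inner loop over enumerate(_, 1)
theorem pv_inner (xs : List String) : ∀ (a : Int) (p : PySem.Dict String String) (f : Int → String),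
    (PySem.List.pyRange a (a + xs.length)).foldl
      (fun p i => p.insert (f i) ((PySem.List.pyGet? xs (i - a)).getD "")) p
    = (PySem.List.enumerate xs a).foldl (fun p q => p.insert (f q.1) q.2) p := by
  induction xs with
  | nil =>
    intro a p f
    rw [PySem.List.pyRange_one_eq_nil (by simp)]
    simp [PySem.List.enumerate]
  | cons x t ih =>
    intro a p f
    have hlen : (a : Int) < a + (t.length + 1 : Nat) := by push_cast; omega
    rw [List.length_cons, PySem.List.pyRange_one_cons hlen, PySem.List.enumerate_cons]
    simp only [List.foldl_cons, sub_self]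
    have h0 : (PySem.List.pyGet? (x :: t) 0).getD "" = x := by
      simp [PySem.List.pyGet?, PySem.List.pyIdx?]
    rw [h0]
    have hshift : (a : Int) + ((t.length + 1 : Nat) : Int) = (a + 1) + (t.length : Int) := by
      push_cast; ring
    rw [hshift]
    have hc := PySem.List.foldl_congr_mem (PySem.List.pyRange (a + 1) (a + 1 + (t.length : Int)))
      (fun (p : PySem.Dict String String) i => p.insert (f i) ((PySem.List.pyGet? (x :: t) (i - a)).getD ""))
      (fun (p : PySem.Dict String String) i => p.insert (f i) ((PySem.List.pyGet? t (i - (a + 1))).getD ""))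
      (p.insert (f a) x)
      (by
        intro acc i hi
        rw [PySem.List.mem_pyRange_one] at hi
        obtain ⟨k, hk⟩ : ∃ k : Nat, i - (a + 1) = (k : Int) := ⟨(i - (a + 1)).toNat, by omega⟩
        have h1 : i - a = (k : Int) + 1 := by omega
        simp only [h1, hk, PySem.List.pyGet?_cons_succ])
    rw [hc]
    exact ih (a + 1) _ f

-- the number of orders for vehicle v is the length of v's description list
theorem pv_count_eq_len (prev_orders : List (String × String)) (v : String) :
    PySem.List.count (prev_orders.map (fun i => i.1)) v = (pvDescs prev_orders v).length := by
  rw [PySem.List.count_eq, List.count_eq_countP, List.countP_map, pvDescs]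
  simp [List.countP_eq_length_filter, Function.comp_def]

-- A's frequency dict lists each distinct vehicle with its count
theorem pv_freq_items (prev_orders : List (String × String)) :
    (get_vehicle_part_freq_dict prev_orders).items
      = (PySem.Set.ofList (prev_orders.map (fun i => i.1))).map
          (fun v => (v, ((PySem.List.count (prev_orders.map (fun i => i.1)) v : Nat) : Int))) := by
  unfold get_vehicle_part_freq_dict
  rw [PySem.Dict.items_foldl_insert_fresh _ (fun v => v)
      (fun v => ((PySem.List.count (prev_orders.map (fun i => i.1)) v : Nat) : Int)) _
      (fun a _ => PySem.Dict.contains_empty a)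
      (by simp)]
  simp [PySem.Dict.empty]

theorem pv_freq_keys (prev_orders : List (String × String)) :
    (get_vehicle_part_freq_dict prev_orders).keys
      = PySem.Set.ofList (prev_orders.map (fun i => i.1)) := by
  have h := pv_freq_items prev_orders
  simp only [PySem.Dict.keys, h, List.map_map]
  simp [Function.comp_def]

theorem pv_freq_getD (prev_orders : List (String × String)) (v : String)
    (hv : v ∈ PySem.Set.ofList (prev_orders.map (fun i => i.1))) :
    (get_vehicle_part_freq_dict prev_orders).getD v 0
      = ((PySem.List.count (prev_orders.map (fun i => i.1)) v : Nat) : Int) := by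
  apply PySem.Dict.getD_of_mem_items
  · rw [pv_freq_items]; exact List.mem_map_of_mem hv
  · rw [pv_freq_keys]; exact PySem.Set.nodup_ofList _

-- B's groups dict lists each distinct vehicle with its description list
theorem pv_groups_items (prev_orders : List (String × String)) :
    (prev_orders.foldl (fun d entry => d.modify entry.1 [] (fun l => l ++ [entry.2]))
        (PySem.Dict.empty : PySem.Dict String (List String))).items
      = (PySem.Set.ofList (prev_orders.map (fun i => i.1))).map
          (fun v => (v, pvDescs prev_orders v)) := by
  set G := prev_orders.foldl (fun d entry => d.modify entry.1 [] (fun l => l ++ [entry.2]))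
      (PySem.Dict.empty : PySem.Dict String (List String)) with hG
  have hkeys : G.keys = PySem.Set.ofList (prev_orders.map (fun i => i.1)) := by
    rw [hG, PySem.Dict.keys_foldl_modify_key prev_orders (fun e => e.1) []
        (fun _ e => fun l => l ++ [e.2]) PySem.Dict.empty,
      PySem.Dict.keys_empty, PySem.Set.update_nil_left]
  have hnodup : G.keys.Nodup := by
    rw [hkeys]; exact PySem.Set.nodup_ofList _
  rw [PySem.Dict.items_eq_map_keys G hnodup [], hkeys]
  apply List.map_congr_left
  intro v _
  have := PySem.Dict.getD_foldl_modify_append prev_orders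
      (PySem.Dict.empty : PySem.Dict String (List String)) v
  rw [hG, this, PySem.Dict.getD_empty]
  simp [pvDescs]

-- main equivalence
theorem pv_main (prev_orders : List (String × String)) :
    get_vehicle_part_to_desc_map prev_orders = get_vehicle_part_to_desc_map_alt prev_orders := by
  unfold get_vehicle_part_to_desc_map get_vehicle_part_to_desc_map_alt
  simp only []
  rw [pv_groups_items, pv_freq_keys, List.foldl_map]
  congr 1
  apply PySem.List.foldl_congr_mem
  intro p v hv
  -- rewrite A's freq lookup to the group length
  have hfreq : (get_vehicle_part_freq_dict prev_orders).getD v 0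
      = ((pvDescs prev_orders v).length : Int) := by
    rw [pv_freq_getD prev_orders v hv, pv_count_eq_len]
  rw [hfreq]
  have h1 : (1 : Int) + ((pvDescs prev_orders v).length : Int)
      = ((pvDescs prev_orders v).length : Int) + 1 := by ring
  rw [← h1]
  exact pv_inner (pvDescs prev_orders v) 1 p (fun i => v ++ "-" ++ pvFmt2 i)

-- ===== VERDICT (by name: the statement is the Claim_ definition above) =====
theorem get_vehicle_part_to_desc_map_spec : Claim_equal_get_vehicle_part_to_desc_map := by
  intro prev_orders _
  unfold Spec_get_vehicle_part_to_desc_map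
  exact pv_main prev_orders
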